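-- pv_equiv track=rewrite | github.com/cadumas01/traffic-sim | sim_ui/src/backend/way_segment.py | load_nodes
-- ===== SOURCE A (Python) =====
-- def load_nodes(noderefs, json_obj):
--     nodes = []
--
--     for noderef in noderefs:
--         node = {"noderef": noderef}
--         if noderef in json_obj["nodes"]["attractions"]:  # Replace this part with a database query if we go that route
--             node.update(json_obj["nodes"]["attractions"][noderef])
--         else:
--             node.update(json_obj["nodes"]["connections"][noderef])
--
--         nodes.append(node)
--
--
--     return nodes
-- ===== SOURCE B (Python) =====
-- def load_nodes(noderefs, json_obj):
--     # Inverted, data-first traversal: sweep the two tables once, building a finished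
--     # record for every requested ref as we pass it (attractions swept last, so they
--     # win), then emit by plain lookup. A missing ref is a KeyError at emission.
--     wanted = set(noderefs)
--     records = {}
--     nodes = json_obj.get("nodes", {})
--     for source in ("connections", "attractions"):
--         for ref, payload in nodes.get(source, {}).items():
--             if ref in wanted:
--                 records[ref] = {"noderef": ref, **payload}
--     return [records[ref] for ref in noderefs]
-- ===== Notes on version B (the rewrite author's own statement) =====
-- stated objective: alternative
-- what changed: B inverts the traversal: it builds a wanted-set of the refs, sweeps the connections table and then the attractions table once, constructing a finished {'noderef': ref, **payload} record for each wanted ref it passes (the later attractions sweep overwrites, giving A's precedence), and finally emits by plain lookup; A instead iterates noderefs doing a membership-test-plus-two-way-branch per element.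
import Mathlib
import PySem

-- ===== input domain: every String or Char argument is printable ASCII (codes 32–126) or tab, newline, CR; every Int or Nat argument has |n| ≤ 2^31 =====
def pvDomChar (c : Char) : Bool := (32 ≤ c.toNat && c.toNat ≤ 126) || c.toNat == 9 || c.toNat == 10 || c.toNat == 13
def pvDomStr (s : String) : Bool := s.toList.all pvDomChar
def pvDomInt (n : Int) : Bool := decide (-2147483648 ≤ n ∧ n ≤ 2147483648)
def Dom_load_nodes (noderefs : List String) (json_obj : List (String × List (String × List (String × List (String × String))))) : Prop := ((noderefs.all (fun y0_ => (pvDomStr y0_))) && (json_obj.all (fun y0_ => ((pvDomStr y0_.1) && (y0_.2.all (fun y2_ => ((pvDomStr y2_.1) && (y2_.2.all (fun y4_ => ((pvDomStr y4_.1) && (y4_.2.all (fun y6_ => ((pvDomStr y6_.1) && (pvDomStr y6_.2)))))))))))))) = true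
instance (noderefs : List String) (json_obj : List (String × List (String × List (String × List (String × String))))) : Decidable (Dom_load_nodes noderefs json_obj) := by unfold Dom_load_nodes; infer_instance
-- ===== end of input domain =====

-- B inverts the traversal: it sweeps the connections and then the attractions table once,
-- building a finished record for every wanted ref (attractions last, so they win), and emits
-- by plain lookup; A branches per noderef instead.

-- ===== PORT A =====
def load_nodes (noderefs : List String) (json_obj : List (String × List (String × List (String × List (String × String))))) : List (List (String × String)) :=
  -- the assoc-list → Dict conversions are representation artifacts, hoisted out of the loop;
  -- A's per-iteration work is the membership test, the branch and the lookups, as in the Python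
  let attractions : PySem.Dict String (List (String × String)) :=
    PySem.Dict.ofList ((PySem.Dict.ofList ((PySem.Dict.ofList json_obj).getD "nodes" [])).getD "attractions" [])
  let connections : PySem.Dict String (List (String × String)) :=
    PySem.Dict.ofList ((PySem.Dict.ofList ((PySem.Dict.ofList json_obj).getD "nodes" [])).getD "connections" [])
  -- nodes = []; for noderef in noderefs: …; nodes.append(node); return nodes
  noderefs.foldl (fun nodes noderef =>
    -- node = {"noderef": noderef}
    let node0 : PySem.Dict String String := PySem.Dict.empty.insert "noderef" noderef
    let node : PySem.Dict String String :=
      if attractions.contains noderef then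
        -- node.update(json_obj["nodes"]["attractions"][noderef])
        (attractions.getD noderef []).foldl (fun d p => d.insert p.1 p.2) node0
      else
        -- node.update(json_obj["nodes"]["connections"][noderef])
        (connections.getD noderef []).foldl (fun d p => d.insert p.1 p.2) node0
    nodes ++ [node.items]) []

-- ===== PORT B =====
-- {"noderef": ref, **payload}
def pvMkRec (ref : String) (payload : List (String × String)) : PySem.Dict String String :=
  payload.foldl (fun d q => d.insert q.1 q.2) (PySem.Dict.empty.insert "noderef" ref)

-- for ref, payload in table.items(): if ref in wanted: records[ref] = {"noderef": ref, **payload}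
def pvSweep (wanted : PySem.Set String)
    (records : PySem.Dict String (PySem.Dict String String))
    (src : List (String × List (String × String))) :
    PySem.Dict String (PySem.Dict String String) :=
  src.foldl (fun records p =>
    if wanted.contains p.1 then records.insert p.1 (pvMkRec p.1 p.2) else records) records

def load_nodes_alt (noderefs : List String) (json_obj : List (String × List (String × List (String × List (String × String))))) : List (List (String × String)) :=
  -- wanted = set(noderefs); records = {}
  let wanted : PySem.Set String := PySem.Set.ofList noderefs
  -- nodes = json_obj.get("nodes", {})
  let nodesd : PySem.Dict String (List (String × List (String × String))) :=
    PySem.Dict.ofList ((PySem.Dict.ofList json_obj).getD "nodes" [])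
  -- for source in ("connections", "attractions"): …
  let records : PySem.Dict String (PySem.Dict String String) :=
    ["connections", "attractions"].foldl
      (fun records source => pvSweep wanted records (PySem.Dict.ofList (nodesd.getD source [])).items)
      PySem.Dict.empty
  -- return [records[ref] for ref in noderefs]
  -- records[ref] raises KeyError when ref is missing; that input is outside Pre_,
  -- and the port returns the (arbitrary) empty record there
  noderefs.map (fun ref => (records.getD ref PySem.Dict.empty).items)

-- ===== PRECONDITION & SPEC =====
-- Pre_ is exactly the set of inputs on which Python A raises no KeyError: for every noderef,
-- "nodes" and "attractions" exist and the ref is in attractions, or "connections" exists and the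
-- ref is in connections (vacuously true when noderefs is empty); B returns on all of these.
def Pre_load_nodes (noderefs : List String) (json_obj : List (String × List (String × List (String × List (String × String))))) : Prop :=
  (let nodesd := PySem.Dict.ofList ((PySem.Dict.ofList json_obj).getD "nodes" [])
   let attr := PySem.Dict.ofList (nodesd.getD "attractions" [])
   let conn := PySem.Dict.ofList (nodesd.getD "connections" [])
   noderefs.all (fun ref =>
     (PySem.Dict.ofList json_obj).contains "nodes"
     && nodesd.contains "attractions"
     && (attr.contains ref || (nodesd.contains "connections" && conn.contains ref)))) = true
instance (noderefs : List String) (json_obj : List (String × List (String × List (String × List (String × String))))) : Decidable (Pre_load_nodes noderefs json_obj) := by unfold Pre_load_nodes; infer_instance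

def pvWitness_load_nodes : List String × (List (String × List (String × List (String × List (String × String))))) :=
  (["a", "c"], [("nodes", [("attractions", [("a", [("x", "1")])]), ("connections", [("c", [("y", "2")])])])])

def Spec_load_nodes (noderefs : List String) (json_obj : List (String × List (String × List (String × List (String × String))))) (out : List (List (String × String))) : Prop := out = load_nodes_alt noderefs json_obj
instance (noderefs : List String) (json_obj : List (String × List (String × List (String × List (String × String))))) (out : List (List (String × String))) : Decidable (Spec_load_nodes noderefs json_obj out) := by unfold Spec_load_nodes; infer_instance

-- ===== CLAIM (what is proved, stated in full; the proofs are below) =====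
def Claim_equal_load_nodes : Prop := ∀ (noderefs : List String) (json_obj : List (String × List (String × List (String × List (String × String))))), Dom_load_nodes noderefs json_obj → Pre_load_nodes noderefs json_obj → Spec_load_nodes noderefs json_obj (load_nodes noderefs json_obj)

-- ===== LEMMAS AND PROOFS =====

-- find? over a dict's items, phrased with contains/getD.
theorem pv_find?_items (d : PySem.Dict String (List (String × String))) (hnd : d.keys.Nodup) (r : String) :
    d.items.find? (fun p => r == p.1) =
      if d.contains r then some (r, d.getD r []) else none := by
  by_cases hc : d.contains r = true
  · have h1 : (d.get? r).isSome := by rw [← PySem.Dict.contains_eq_isSome_get?]; exact hc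
    obtain ⟨v, hv⟩ := Option.isSome_iff_exists.1 h1
    have hmem : (r, v) ∈ d.items := PySem.Dict.mem_items_of_get?_eq_some d hv
    have hex : (d.items.find? (fun p => r == p.1)).isSome :=
      List.find?_isSome.2 ⟨(r, v), hmem, by simp⟩
    obtain ⟨q, hq⟩ := Option.isSome_iff_exists.1 hex
    have hqmem : q ∈ d.items := List.mem_of_find?_eq_some hq
    have hqpred := List.find?_some hq
    simp only [beq_iff_eq] at hqpred
    have hq2 : d.get? q.1 = some q.2 := PySem.Dict.get?_of_mem_items d hqmem hnd
    rw [← hqpred, hv] at hq2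
    have hgd : d.getD r [] = v := PySem.Dict.getD_of_get?_eq_some d [] hv
    rw [hq, if_pos hc, hgd]
    have : q = (r, v) := by
      obtain ⟨q1, q2⟩ := q
      simp only at hqpred hq2
      simp [← hqpred]
      exact (Option.some.inj hq2).symm
    rw [this]
  · have hb : d.contains r = false := by simpa using hc
    have h1 : d.get? r = none := by
      have h2 : (d.get? r).isSome = false := by rw [← PySem.Dict.contains_eq_isSome_get?]; exact hb
      simpa [Option.isSome_eq_false_iff, Option.isNone_iff_eq_none] using h2
    rw [if_neg hc]
    apply List.find?_eq_none.2
    intro q hq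
    simp only [beq_iff_eq]
    intro hqr
    have hq2 : d.get? q.1 = some q.2 := PySem.Dict.get?_of_mem_items d (by simpa using hq) hnd
    rw [← hqr, h1] at hq2
    cases hq2

-- Pointwise effect of one sweep over a table with distinct keys.
theorem pv_sweep_get? (wanted : PySem.Set String)
    (recs : PySem.Dict String (PySem.Dict String String))
    (src : List (String × List (String × String)))
    (hnd : (src.map Prod.fst).Nodup) (r : String) :
    (pvSweep wanted recs src).get? r =
      match src.find? (fun p => r == p.1) with
      | some p => if wanted.contains p.1 then some (pvMkRec p.1 p.2) else recs.get? r
      | none => recs.get? r := by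
  induction src generalizing recs with
  | nil => rfl
  | cons p t ih =>
      have hnd' : (t.map Prod.fst).Nodup := by
        rw [List.map_cons, List.nodup_cons] at hnd; exact hnd.2
      have hp1 : p.1 ∉ t.map Prod.fst := by
        rw [List.map_cons, List.nodup_cons] at hnd; exact hnd.1
      simp only [pvSweep, List.foldl_cons] at *
      rw [ih _ hnd']
      by_cases hpm : r = p.1
      · have hfind : t.find? (fun q => r == q.1) = none := by
          apply List.find?_eq_none.2
          intro q hq
          simp only [beq_iff_eq]
          intro hqr
          exact hp1 (List.mem_map.2 ⟨q, hq, by rw [← hqr, ← hpm]⟩)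
        rw [hfind]
        subst hpm
        by_cases hw : p.1 ∈ wanted
        · simp [hw, PySem.Dict.get?_insert_self]
        · simp [hw]
      · have hstep : (if p.1 ∈ wanted then recs.insert p.1 (pvMkRec p.1 p.2) else recs).get? r = recs.get? r := by
          split_ifs with hw
          · exact PySem.Dict.get?_insert_of_ne recs (pvMkRec p.1 p.2) hpm
          · rfl
        have hpm' : ¬ (r == p.1) = true := by simpa using hpm
        rcases hft : t.find? (fun q => r == q.1) with _ | q
        · simp [hpm', hft, hstep]
        · simp [hpm', hft, hstep]

-- Sweep over a dict's items, phrased with contains/getD.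
theorem pv_sweep_dict_get? (wanted : PySem.Set String)
    (recs : PySem.Dict String (PySem.Dict String String))
    (d : PySem.Dict String (List (String × String))) (hnd : d.keys.Nodup) (r : String) :
    (pvSweep wanted recs d.items).get? r =
      if d.contains r = true ∧ r ∈ wanted then some (pvMkRec r (d.getD r []))
      else recs.get? r := by
  have hnd' : (d.items.map Prod.fst).Nodup := by simpa [PySem.Dict.keys] using hnd
  rw [pv_sweep_get? wanted recs d.items hnd' r, pv_find?_items d hnd r]
  by_cases hc : d.contains r = true
  · by_cases hw : r ∈ wanted
    · simp [hc, hw]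
    · simp [hc, hw]
  · simp [hc]

-- ===== VERDICT (by name: the statement is the Claim_ definition above) =====
theorem load_nodes_spec : Claim_equal_load_nodes := by
  intro noderefs json_obj _hdom hpre
  unfold Spec_load_nodes load_nodes load_nodes_alt
  rw [PySem.List.foldl_append_singleton_eq_map, List.nil_append]
  simp only [List.foldl_cons, List.foldl_nil]
  refine List.map_congr_left ?_
  intro ref hmem
  unfold Pre_load_nodes at hpre
  simp only [List.all_eq_true] at hpre
  have h := hpre ref hmem
  simp only [Bool.and_eq_true, Bool.or_eq_true] at h
  have hw : ref ∈ PySem.Set.ofList noderefs := (PySem.Set.mem_ofList _ _).2 hmem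
  conv_rhs => rw [PySem.Dict.getD_eq_get?_getD,
    pv_sweep_dict_get? _ _ _ (PySem.Dict.nodup_keys_ofList _) ref,
    pv_sweep_dict_get? _ _ _ (PySem.Dict.nodup_keys_ofList _) ref]
  by_cases ha : (PySem.Dict.ofList ((PySem.Dict.ofList ((PySem.Dict.ofList json_obj).getD "nodes" [])).getD "attractions" [])).contains ref = true
  · rw [if_pos ha, if_pos ⟨ha, hw⟩, Option.getD_some]
    rfl
  · have hor := h.2
    rcases hor with hac | hac
    · exact absurd hac ha
    · rw [if_neg ha, if_neg (fun hc => ha hc.1), if_pos ⟨hac.2, hw⟩, Option.getD_some]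
      rfl
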